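-- pv_equiv track=rewrite | github.com/dreiksss/workspace | elemsinlist.py | elems_in_list
-- ===== SOURCE A (Python) =====
-- def elems_in_list(mylist):
-- 	"""elems_in_list(list)
--
-- 	 -- return new list with unique elements of list in order from rarer to often
--
-- 	"""
--
-- 	res = []
-- 	dictSort = {}
-- 	for item in mylist:
-- 		occur = mylist.count(item)
-- 		if occur in dictSort:
-- 			if item not in dictSort[occur]:
-- 				dictSort[occur].append(item)
-- 		else:
-- 			dictSort[occur] = [item]
-- 	occurList = list(dictSort.keys())
-- 	occurList.sort()
-- 	for occur in occurList:
-- 		for num in dictSort[occur]: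
-- 			res.append(num)
-- 	return res
-- ===== SOURCE B (Python) =====
-- def elems_in_list(mylist):
--     counts = {}
--     for item in mylist:
--         counts[item] = counts.get(item, 0) + 1
--     uniques = list(dict.fromkeys(mylist))
--     return sorted(uniques, key=lambda x: counts[x])
-- ===== Notes on version B (the rewrite author's own statement) =====
-- stated objective: faster
-- what changed: Replaces A's per-item mylist.count scan (quadratic) and its count-keyed bucket dict flattened after a key sort by a single-pass frequency dict, an ordered dedup, and one stable sort of the unique elements keyed by frequency.
import Mathlib
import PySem

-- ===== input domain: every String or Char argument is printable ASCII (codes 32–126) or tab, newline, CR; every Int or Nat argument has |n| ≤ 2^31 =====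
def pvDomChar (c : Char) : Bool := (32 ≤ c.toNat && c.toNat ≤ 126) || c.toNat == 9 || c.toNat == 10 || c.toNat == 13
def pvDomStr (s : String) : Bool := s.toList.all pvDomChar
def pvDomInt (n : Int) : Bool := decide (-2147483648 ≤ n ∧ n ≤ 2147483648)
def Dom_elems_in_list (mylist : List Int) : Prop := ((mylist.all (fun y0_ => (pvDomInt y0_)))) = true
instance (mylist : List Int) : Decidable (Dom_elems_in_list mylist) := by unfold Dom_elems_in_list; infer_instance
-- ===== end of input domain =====

-- B replaces A's per-item mylist.count scan and its count-keyed bucket dict (flattened after a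
-- key sort) by one frequency-dict pass, an ordered dedup, and a single stable sort by frequency.

-- ===== PORT A =====
-- the body of A's first for-loop (one scanned item updates the count-keyed bucket dict)
def pvStepA (mylist : List Int) (d : PySem.Dict Int (List Int)) (item : Int) :
    PySem.Dict Int (List Int) :=
  let occur : Int := (PySem.List.count mylist item : Int)
  if d.contains occur then
    if !((d.getD occur []).contains item) then
      d.insert occur ((d.getD occur []) ++ [item])
    else d
  else d.insert occur [item]

def elems_in_list (mylist : List Int) : List Int :=
  let res : List Int := []
  let dictSort : PySem.Dict Int (List Int) := PySem.Dict.empty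
  let dictSort := mylist.foldl (pvStepA mylist) dictSort
  let occurList := dictSort.keys
  let occurList := PySem.List.sorted occurList (fun x => x) false
  occurList.foldl (fun res occur =>
    (dictSort.getD occur []).foldl (fun res num => res ++ [num]) res) res

-- ===== PORT B =====
def elems_in_list_alt (mylist : List Int) : List Int :=
  let counts : PySem.Dict Int Int :=
    mylist.foldl (fun d item => d.insert item (d.getD item 0 + 1)) PySem.Dict.empty
  let uniques := PySem.List.dedup mylist
  PySem.List.sorted uniques (fun x => counts.getD x 0) false

-- ===== PRECONDITION & SPEC =====
def Spec_elems_in_list (mylist : List Int) (out : List Int) : Prop := out = elems_in_list_alt mylist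
instance (mylist : List Int) (out : List Int) : Decidable (Spec_elems_in_list mylist out) := by unfold Spec_elems_in_list; infer_instance

-- ===== CLAIM (what is proved, stated in full; the proofs are below) =====
def Claim_equal_elems_in_list : Prop := ∀ (mylist : List Int), Dom_elems_in_list mylist → Spec_elems_in_list mylist (elems_in_list mylist)

-- ===== LEMMAS AND PROOFS =====

-- the frequency key both programs order by
def pvKey (mylist : List Int) (x : Int) : Int := (List.count x mylist : Int)

-- stability of Python's sort: an inserted element lands after all elements of equal key
theorem pv_filter_insertBy (key : Int → Int) (x c : Int) :
    ∀ ys : List Int, ys.Pairwise (fun a b => key a ≤ key b) →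
    (PySem.List.insertBy (fun a b => decide (key a < key b)) x ys).filter (fun y => key y == c) =
      if key x == c then ys.filter (fun y => key y == c) ++ [x]
      else ys.filter (fun y => key y == c) := by
  intro ys
  induction ys with
  | nil =>
    intro _
    by_cases hxc : key x = c <;> simp [PySem.List.insertBy, hxc]
  | cons y ys ih =>
    intro h
    rcases List.pairwise_cons.1 h with ⟨hy, ht⟩
    by_cases hlt : key x < key y
    · have hins : PySem.List.insertBy (fun a b => decide (key a < key b)) x (y :: ys) =
          x :: y :: ys := by simp [PySem.List.insertBy, hlt]
      rw [hins]
      by_cases hxc : key x = c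
      · have hnil : (y :: ys).filter (fun z => key z == c) = [] := by
          apply List.filter_eq_nil_iff.2
          intro z hz
          have hyz : key y ≤ key z := by
            rcases List.mem_cons.1 hz with rfl | hz'
            · exact le_refl _
            · exact hy z hz'
          have : c < key z := by omega
          simp; omega
        simp [hxc, hnil]
      · simp [List.filter_cons, hxc]
    · have hins : PySem.List.insertBy (fun a b => decide (key a < key b)) x (y :: ys) =
          y :: PySem.List.insertBy (fun a b => decide (key a < key b)) x ys := by
        simp [PySem.List.insertBy, hlt]
      rw [hins, List.filter_cons, ih ht, List.filter_cons]
      by_cases hyc : key y = c <;> by_cases hxc : key x = c <;> simp [hyc, hxc]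
  
theorem pv_sorted_filter_stable (key : Int → Int) (U : List Int) (c : Int) :
    (PySem.List.sorted U key false).filter (fun y => key y == c) =
      U.filter (fun y => key y == c) := by
  induction U using List.reverseRecOn with
  | nil => simp [PySem.List.sorted]
  | append_singleton xs x ih =>
    rw [PySem.List.sorted_eq_foldl_insertBy, List.foldl_append, List.foldl_cons, List.foldl_nil,
      ← PySem.List.sorted_eq_foldl_insertBy,
      pv_filter_insertBy key x c _ (PySem.List.sorted_pairwise xs key), List.filter_append]
    by_cases hxc : key x = c <;> simp [hxc, ih]

-- a permutation ordered by key and stable w.r.t. a reference list is unique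
theorem pv_stable_unique (key : Int → Int) :
    ∀ (l₁ l₂ : List Int), l₁.Perm l₂ →
      l₁.Pairwise (fun a b => key a ≤ key b) → l₂.Pairwise (fun a b => key a ≤ key b) →
      (∀ c, l₁.filter (fun y => key y == c) = l₂.filter (fun y => key y == c)) →
      l₁ = l₂ := by
  intro l₁
  induction l₁ with
  | nil =>
    intro l₂ hp _ _ _
    exact (List.Perm.eq_nil hp.symm).symm
  | cons a t ih =>
    intro l₂ hp h1 h2 hf
    cases l₂ with
    | nil => exact absurd (List.Perm.eq_nil hp) (by simp)
    | cons b t₂ =>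
      have h1h := (List.pairwise_cons.1 h1).1
      have h2h := (List.pairwise_cons.1 h2).1
      have hk : key a = key b := by
        have hmemb : b ∈ a :: t := hp.mem_iff.2 (by simp)
        have hmema : a ∈ b :: t₂ := hp.mem_iff.1 (by simp)
        have hab : key a ≤ key b := by
          rcases List.mem_cons.1 hmemb with rfl | hb'
          · exact le_refl _
          · exact h1h b hb'
        have hba : key b ≤ key a := by
          rcases List.mem_cons.1 hmema with h' | ha'
          · rw [h']
          · exact h2h a ha'
        omega
      have hab : a = b := by
        have hfa := hf (key a)
        rw [List.filter_cons, List.filter_cons] at hfa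
        simp [hk] at hfa
        exact hfa.1
      subst hab
      have ht : t = t₂ := by
        apply ih t₂ hp.cons_inv (List.pairwise_cons.1 h1).2 (List.pairwise_cons.1 h2).2
        intro c
        have hfc := hf c
        rw [List.filter_cons, List.filter_cons] at hfc
        by_cases hac : key a = c
        · simp [hac] at hfc; exact hfc
        · simpa [hac] using hfc
      rw [ht]

theorem pv_count_flatMap (g : Int → List Int) (a : Int) :
    ∀ ks : List Int, (ks.flatMap g).count a = (ks.map (fun c => (g c).count a)).sum := by
  intro ks; induction ks with
  | nil => simp
  | cons d ks ih => simp [List.flatMap_cons, List.count_append, ih]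

theorem pv_sum_ite (k : Int) (m : Nat) :
    ∀ ks : List Int, ks.Nodup →
      ((ks.map (fun c => if k = c then m else 0)).sum = if k ∈ ks then m else 0) := by
  intro ks
  induction ks with
  | nil => simp
  | cons d ks ih =>
    intro hnd
    rcases List.nodup_cons.1 hnd with ⟨hd, hnd'⟩
    by_cases hkd : k = d
    · subst hkd
      simp [ih hnd', hd]
    · simp [hkd, ih hnd', List.mem_cons]

theorem pv_flatMap_filter_perm (key : Int → Int) (U ks : List Int) (hnd : ks.Nodup)
    (hcov : ∀ x ∈ U, key x ∈ ks) :
    (ks.flatMap (fun c => U.filter (fun x => key x == c))).Perm U := by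
  rw [List.perm_iff_count]
  intro a
  rw [pv_count_flatMap]
  by_cases ha : a ∈ U
  · have hterm : ks.map (fun c => (U.filter (fun x => key x == c)).count a) =
        ks.map (fun c => if key a = c then U.count a else 0) := by
      apply List.map_congr_left
      intro c _
      by_cases h : key a = c
      · rw [if_pos h, List.count_filter (by simp [h])]
      · rw [if_neg h, List.count_eq_zero]
        simp [List.mem_filter, h]
    rw [hterm, pv_sum_ite (key a) (U.count a) ks hnd, if_pos (hcov a ha)]
  · have h0 : U.count a = 0 := List.count_eq_zero.2 ha
    have hterm : ks.map (fun c => (U.filter (fun x => key x == c)).count a) =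
        ks.map (fun _ => 0) := by
      apply List.map_congr_left
      intro c _
      rw [List.count_eq_zero]
      intro hmem
      exact ha (List.mem_filter.1 hmem).1
    rw [hterm, h0]
    simp

theorem pv_pairwise_const (key : Int → Int) (d : Int) :
    ∀ l : List Int, (∀ a ∈ l, key a = d) → l.Pairwise (fun a b => key a ≤ key b) := by
  intro l
  induction l with
  | nil => intro _; simp
  | cons x l ih =>
    intro h
    apply List.pairwise_cons.2
    refine ⟨?_, ih (fun a ha => h a (by simp [ha]))⟩
    intro b hb
    rw [h x (by simp), h b (by simp [hb])]

theorem pv_pairwise_flatMap_filter (key : Int → Int) (U : List Int) :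
    ∀ ks : List Int, ks.Pairwise (· < ·) →
      (ks.flatMap (fun c => U.filter (fun x => key x == c))).Pairwise
        (fun a b => key a ≤ key b) := by
  intro ks
  induction ks with
  | nil => intro _; simp
  | cons d ks ih =>
    intro hks
    rcases List.pairwise_cons.1 hks with ⟨hd, ht⟩
    rw [List.flatMap_cons]
    apply List.pairwise_append.2
    refine ⟨?_, ih ht, ?_⟩
    · apply pv_pairwise_const key d
      intro a haf
      simpa using (List.mem_filter.1 haf).2
    · intro a ha b hb
      have hka : key a = d := by simpa using (List.mem_filter.1 ha).2
      rcases List.mem_flatMap.1 hb with ⟨c, hc, hbc⟩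
      have hkb : key b = c := by simpa using (List.mem_filter.1 hbc).2
      have : d < c := hd c hc
      omega

theorem pv_block_nil (key : Int → Int) (U : List Int) {d c : Int} (h : d ≠ c) :
    (U.filter (fun x => key x == d)).filter (fun y => key y == c) = [] := by
  apply List.filter_eq_nil_iff.2
  intro z hz
  have : key z = d := by simpa using (List.mem_filter.1 hz).2
  simp [this, h]

theorem pv_filter_flatMap_filter (key : Int → Int) (U ks : List Int) (hnd : ks.Nodup)
    (hcov : ∀ x ∈ U, key x ∈ ks) (c : Int) :
    (ks.flatMap (fun d => U.filter (fun x => key x == d))).filter (fun y => key y == c) =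
      U.filter (fun y => key y == c) := by
  rw [List.filter_flatMap]
  by_cases hc : c ∈ ks
  · obtain ⟨l₁, l₂, rfl⟩ := List.append_of_mem hc
    rw [List.nodup_append] at hnd
    have hc1 : c ∉ l₁ := fun h => hnd.2.2 c h c (by simp) rfl
    have hc2 : c ∉ l₂ := (List.nodup_cons.1 hnd.2.1).1
    rw [List.flatMap_append, List.flatMap_cons]
    have h1 : l₁.flatMap (fun d => (U.filter (fun x => key x == d)).filter (fun y => key y == c)) = [] := by
      apply List.flatMap_eq_nil_iff.2
      intro d hd
      exact pv_block_nil key U (fun h => hc1 (h ▸ hd))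
    have h2 : l₂.flatMap (fun d => (U.filter (fun x => key x == d)).filter (fun y => key y == c)) = [] := by
      apply List.flatMap_eq_nil_iff.2
      intro d hd
      exact pv_block_nil key U (fun h => hc2 (h ▸ hd))
    have hmid : (U.filter (fun x => key x == c)).filter (fun y => key y == c) =
        U.filter (fun y => key y == c) := by
      rw [List.filter_filter]
      apply List.filter_congr
      intro x _
      cases h : (key x == c)
      · simp [h]
      · simp
    rw [h1, h2, hmid]
    simp
  · have h1 : ks.flatMap (fun d => (U.filter (fun x => key x == d)).filter (fun y => key y == c)) = [] := by
      apply List.flatMap_eq_nil_iff.2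
      intro d hd
      exact pv_block_nil key U (fun h => hc (h ▸ hd))
    rw [h1]
    symm
    apply List.filter_eq_nil_iff.2
    intro z hz hzc
    apply hc
    have : key z = c := by simpa using hzc
    exact this ▸ hcov z hz

-- the stable sort is the ascending-key concatenation of the key classes in reference order
theorem pv_stable_sort_eq_flatMap (key : Int → Int) (U : List Int) :
    PySem.List.sorted U key false =
      (PySem.List.sorted (PySem.Set.ofList (U.map key)) (fun x => x) false).flatMap
        (fun c => U.filter (fun x => key x == c)) := by
  have hksnd : (PySem.List.sorted (PySem.Set.ofList (U.map key)) (fun x => x) false).Nodup :=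
    ((PySem.List.sorted_perm (PySem.Set.ofList (U.map key)) (fun x => x) false).nodup_iff).2
      (PySem.Set.nodup_ofList _)
  have hcov : ∀ x ∈ U, key x ∈ PySem.List.sorted (PySem.Set.ofList (U.map key)) (fun x => x) false := by
    intro x hx
    rw [PySem.List.mem_sorted, PySem.Set.mem_ofList]
    exact List.mem_map_of_mem hx
  apply pv_stable_unique key
  · exact (PySem.List.sorted_perm U key false).trans
      (pv_flatMap_filter_perm key U _ hksnd hcov).symm
  · exact PySem.List.sorted_pairwise U key
  · exact pv_pairwise_flatMap_filter key U _ (PySem.List.sorted_ofList_pairwise_lt _)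
  · intro c
    rw [pv_sorted_filter_stable, pv_filter_flatMap_filter key U _ hksnd hcov]

-- ordered dedup commutes with filter
theorem pv_ofList_filter (p : Int → Bool) (l : List Int) :
    PySem.Set.ofList (l.filter p) = (PySem.Set.ofList l).filter p := by
  induction l using List.reverseRecOn with
  | nil => simp [PySem.Set.ofList]
  | append_singleton xs x ih =>
    rw [List.filter_append, PySem.Set.ofList_append_singleton]
    by_cases hpx : p x
    · have : List.filter p [x] = [x] := by simp [hpx]
      rw [this, PySem.Set.ofList_append_singleton, ih,
        PySem.Set.add_eq_ite, PySem.Set.add_eq_ite]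
      by_cases hx : x ∈ PySem.Set.ofList xs
      · rw [if_pos hx, if_pos (List.mem_filter.2 ⟨hx, hpx⟩)]
      · rw [if_neg hx, if_neg (fun h => hx (List.mem_filter.1 h).1), List.filter_append]
        simp [hpx]
    · have : List.filter p [x] = [] := by simp [hpx]
      rw [this, List.append_nil, ih, PySem.Set.add_eq_ite]
      by_cases hx : x ∈ PySem.Set.ofList xs
      · rw [if_pos hx]
      · rw [if_neg hx, List.filter_append]
        simp [hpx]

-- A's bucket dict: the value at c collects, in first-seen order, the scanned items of key c
theorem pv_stepA_getD (mylist : List Int) (c : Int) (d : PySem.Dict Int (List Int)) (item : Int) :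
    (pvStepA mylist d item).getD c [] =
      if pvKey mylist item = c then PySem.Set.add (d.getD c []) item else d.getD c [] := by
  have hpk : pvKey mylist item = ((List.count item mylist : Nat) : Int) := by simp [pvKey]
  by_cases hc : pvKey mylist item = c
  · rw [if_pos hc, ← hc, hpk]
    simp only [pvStepA, PySem.List.count_eq]
    by_cases hcont : d.contains ((List.count item mylist : Nat) : Int)
    · by_cases hmem : item ∈ d.getD ((List.count item mylist : Nat) : Int) []
      · simp [hcont, hmem]
      · simp [hcont, hmem, PySem.Dict.getD_insert_self]
    · have hcf : d.contains ((List.count item mylist : Nat) : Int) = false := by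
        simpa using hcont
      simp [hcf, PySem.Dict.getD_insert_self,
        PySem.Dict.getD_of_not_contains d [] hcf]
  · rw [if_neg hc]
    have hcc : ((List.count item mylist : Nat) : Int) ≠ c := fun h => hc (hpk ▸ h)
    have hcc' : c ≠ ((List.count item mylist : Nat) : Int) := Ne.symm hcc
    simp only [pvStepA, PySem.List.count_eq]
    by_cases hcont : d.contains ((List.count item mylist : Nat) : Int)
    · by_cases hmem : item ∈ d.getD ((List.count item mylist : Nat) : Int) []
      · simp [hcont, hmem]
      · simp [hcont, hmem, PySem.Dict.getD_insert, hcc']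
    · have hcf : d.contains ((List.count item mylist : Nat) : Int) = false := by
        simpa using hcont
      simp [hcf, PySem.Dict.getD_insert, hcc']

theorem pv_foldl_getD (mylist : List Int) (c : Int) :
    ∀ (l : List Int) (d : PySem.Dict Int (List Int)),
      (l.foldl (pvStepA mylist) d).getD c [] =
        PySem.Set.update (d.getD c []) (l.filter (fun x => pvKey mylist x == c)) := by
  intro l
  induction l with
  | nil => intro d; simp [PySem.Set.update]
  | cons item l ih =>
    intro d
    rw [List.foldl_cons, ih, pv_stepA_getD, List.filter_cons]
    by_cases h : pvKey mylist item = c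
    · simp [h, PySem.Set.update_cons]
    · simp [h]

-- A's bucket dict: the keys are the distinct counts in first-seen order
theorem pv_stepA_keys (mylist : List Int) (d : PySem.Dict Int (List Int)) (item : Int) :
    (pvStepA mylist d item).keys = PySem.Set.add d.keys (pvKey mylist item) := by
  have hpk : pvKey mylist item = ((List.count item mylist : Nat) : Int) := by simp [pvKey]
  rw [hpk]
  simp only [pvStepA, PySem.List.count_eq]
  by_cases hcont : d.contains ((List.count item mylist : Nat) : Int)
  · have hmemk : ((List.count item mylist : Nat) : Int) ∈ d.keys :=
      (PySem.Dict.contains_iff_mem_keys d _).1 hcont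
    by_cases hmem : item ∈ d.getD ((List.count item mylist : Nat) : Int) []
    · simp [hcont, hmem, hmemk]
    · simp [hcont, hmem, PySem.Dict.keys_insert_of_contains d _ hcont, hmemk]
  · have hcf : d.contains ((List.count item mylist : Nat) : Int) = false := by simpa using hcont
    have hmemk : ((List.count item mylist : Nat) : Int) ∉ d.keys := fun h => by
      simp [(PySem.Dict.contains_iff_mem_keys d _).2 h] at hcf
    simp [hcf, PySem.Dict.keys_insert_of_not_contains d _ hcf, hmemk]

theorem pv_foldl_keys (mylist : List Int) :
    ∀ (l : List Int) (d : PySem.Dict Int (List Int)),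
      (l.foldl (pvStepA mylist) d).keys =
        PySem.Set.update d.keys (l.map (pvKey mylist)) := by
  intro l
  induction l with
  | nil => intro d; simp [PySem.Set.update]
  | cons item l ih =>
    intro d
    rw [List.foldl_cons, ih, pv_stepA_keys, List.map_cons, PySem.Set.update_cons]

theorem pv_A_eq (mylist : List Int) :
    elems_in_list mylist =
      (PySem.List.sorted (PySem.Set.ofList (mylist.map (pvKey mylist))) (fun x => x) false).flatMap
        (fun c => (PySem.Set.ofList mylist).filter (fun x => pvKey mylist x == c)) := by
  simp only [elems_in_list]
  rw [pv_foldl_keys mylist mylist PySem.Dict.empty,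
    show (PySem.Dict.empty : PySem.Dict Int (List Int)).keys = [] from rfl,
    PySem.Set.update_nil_left]
  have hfun : (fun (res : List Int) (occur : Int) =>
      ((mylist.foldl (pvStepA mylist) PySem.Dict.empty).getD occur []).foldl
        (fun res num => res ++ [num]) res)
      = fun res occur => res ++ (PySem.Set.ofList mylist).filter (fun x => pvKey mylist x == occur) := by
    funext res occur
    rw [PySem.List.foldl_append_singleton_eq_self,
      pv_foldl_getD mylist occur mylist PySem.Dict.empty,
      show (PySem.Dict.empty : PySem.Dict Int (List Int)).getD occur [] = [] from rfl,
      PySem.Set.update_nil_left, pv_ofList_filter]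
  rw [hfun, PySem.List.foldl_append_eq_flatMap]
  simp

theorem pv_B_eq (mylist : List Int) :
    elems_in_list_alt mylist =
      PySem.List.sorted (PySem.Set.ofList mylist) (pvKey mylist) false := by
  simp only [elems_in_list_alt]
  have hk : (fun x : Int =>
      (mylist.foldl (fun d item => d.insert item (d.getD item 0 + 1)) PySem.Dict.empty).getD x 0)
      = pvKey mylist := by
    funext x
    rw [PySem.Dict.getD_foldl_insert_add_one]
    simp [pvKey, show (PySem.Dict.empty : PySem.Dict Int Int).getD x 0 = 0 from rfl]
  rw [hk]
  simp [PySem.List.dedup_eq_ofList]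

-- ===== VERDICT (by name: the statement is the Claim_ definition above) =====
theorem elems_in_list_spec : Claim_equal_elems_in_list := by
  intro mylist _
  unfold Spec_elems_in_list
  rw [pv_A_eq, pv_B_eq,
    pv_stable_sort_eq_flatMap (pvKey mylist) (PySem.Set.ofList mylist)]
  have hperm : (PySem.Set.ofList ((PySem.Set.ofList mylist).map (pvKey mylist))).Perm
      (PySem.Set.ofList (mylist.map (pvKey mylist))) := by
    apply (List.perm_ext_iff_of_nodup (PySem.Set.nodup_ofList _) (PySem.Set.nodup_ofList _)).2
    intro c
    simp [PySem.Set.mem_ofList, List.mem_map]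
  rw [PySem.List.sorted_eq_sorted_of_perm _ _ _ (fun a b h => h) hperm]
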